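-- pv_equiv track=rewrite | github.com/datahub-project/datahub | metadata-ingestion/src/datahub/ingestion/source/rdf/entities/domain/urn_generator.py | generate_domain_hierarchy_from_urn
-- ===== SOURCE A (Python) =====
-- from typing import List, Optional
--
-- def generate_domain_hierarchy_from_urn(domain_urn: str) -> List[str]:
--     """
--     Generate a list of parent domain URNs from a domain URN.
--     Creates the full hierarchy from root to the target domain.
--
--     Args:
--         domain_urn: The target domain URN
--
--     Returns:
--         List of parent domain URNs in hierarchical order
--     """
--     # Extract the path from the URN
--     path = domain_urn.replace("urn:li:domain:", "")
--
--     if not path: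
--         return []
--
--     # Split the path into segments
--     segments = path.split("/")
--
--     # Build hierarchy from root to target
--     hierarchy = []
--     current_path = ""
--
--     for _i, segment in enumerate(segments):
--         if current_path:
--             current_path += f"/{segment}"
--         else:
--             current_path = segment
--
--         # Create URN for this level
--         hierarchy.append(f"urn:li:domain:{current_path}")
--
--     return hierarchy
-- ===== SOURCE B (Python) =====
-- def generate_domain_hierarchy_from_urn(domain_urn):
--     path = domain_urn.replace("urn:li:domain:", "")
--     if not path:
--         return []
--     segments = path.split("/")
--     return [
--         "urn:li:domain:" + "/".join(segments[: i + 1])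
--         for i in range(len(segments))
--     ]
-- ===== Notes on version B (the rewrite author's own statement) =====
-- stated objective: alternative
-- what changed: Replaces A's running current_path accumulator loop with a per-level slice-and-join comprehension that rebuilds each hierarchy prefix independently from segments[:i+1].
-- intended difference: On URNs whose stripped path begins with a slash (leading empty segments), A's truthiness check silently drops the leading slashes so the deepest returned URN names a different domain, while B keeps them so the deepest URN is the input URN itself, which is the intended hierarchy. — e.g. on generate_domain_hierarchy_from_urn("urn:li:domain:/a"): A returns ["urn:li:domain:", "urn:li:domain:a"], B returns ["urn:li:domain:", "urn:li:domain:/a"]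
import Mathlib
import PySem

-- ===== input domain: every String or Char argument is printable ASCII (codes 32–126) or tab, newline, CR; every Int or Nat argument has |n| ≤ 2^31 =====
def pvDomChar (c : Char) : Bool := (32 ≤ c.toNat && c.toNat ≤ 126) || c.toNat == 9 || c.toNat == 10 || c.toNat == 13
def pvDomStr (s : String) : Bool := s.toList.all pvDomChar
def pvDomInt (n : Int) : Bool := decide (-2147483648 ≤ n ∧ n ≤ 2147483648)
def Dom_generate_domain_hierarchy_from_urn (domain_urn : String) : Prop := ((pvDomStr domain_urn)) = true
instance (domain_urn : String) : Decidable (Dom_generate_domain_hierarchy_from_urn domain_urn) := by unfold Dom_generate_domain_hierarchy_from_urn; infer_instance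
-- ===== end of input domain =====

-- B rebuilds each hierarchy level independently by joining a slice of the segment
-- list instead of A's running current_path accumulator ("alternative" objective);
-- A and B differ only on the leading-empty-segment inputs stated in D_ below.

-- ===== PORT A =====
-- the "urn:li:domain:" literal, used by both ports (as a List Char; string work is done on code points)
def pvPrefix : List Char := "urn:li:domain:".toList

-- the body of A's for-loop: state = (hierarchy, current_path)
def pvStepA (st : List (List Char) × List Char) (segment : List Char) : List (List Char) × List Char :=
  if st.2 ≠ [] then
    let cur := st.2 ++ '/' :: segment
    (st.1 ++ [pvPrefix ++ cur], cur)
  else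
    (st.1 ++ [pvPrefix ++ segment], segment)

def generate_domain_hierarchy_from_urn (domain_urn : String) : List String :=
  let path := PySem.Chars.replace domain_urn.toList pvPrefix []
  if path = [] then []
  else
    let segments := PySem.Chars.splitOn path ['/']
    ((segments.foldl pvStepA ([], [])).1).map String.ofList

-- ===== PORT B =====
def generate_domain_hierarchy_from_urn_alt (domain_urn : String) : List String :=
  let path := PySem.Chars.replace domain_urn.toList pvPrefix []
  if path = [] then []
  else
    let segments := PySem.Chars.splitOn path ['/']
    (PySem.List.pyRange 0 (segments.length : Int) 1).map
      (fun i => String.ofList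
        (pvPrefix ++ PySem.Chars.join ['/'] (PySem.List.slice segments none (some (i + 1)))))

-- ===== PRECONDITION & SPEC =====
-- On URNs whose stripped path begins with a slash (leading empty segments), A's
-- truthiness check silently drops the leading slashes so the deepest returned URN names
-- a different domain, while B keeps them so the deepest URN is the input URN itself,
-- which is the intended hierarchy.
def D_generate_domain_hierarchy_from_urn (domain_urn : String) : Prop :=
  PySem.Str.replace domain_urn "urn:li:domain:" "" ≠ ""
    ∧ PySem.Str.startswith (PySem.Str.replace domain_urn "urn:li:domain:" "") "/" = true
instance (domain_urn : String) : Decidable (D_generate_domain_hierarchy_from_urn domain_urn) := by unfold D_generate_domain_hierarchy_from_urn; infer_instance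

def Spec_generate_domain_hierarchy_from_urn (domain_urn : String) (out : List String) : Prop := ¬ D_generate_domain_hierarchy_from_urn domain_urn → out = generate_domain_hierarchy_from_urn_alt domain_urn
instance (domain_urn : String) (out : List String) : Decidable (Spec_generate_domain_hierarchy_from_urn domain_urn out) := by unfold Spec_generate_domain_hierarchy_from_urn; infer_instance

def pvDiffWitness_generate_domain_hierarchy_from_urn : String := "urn:li:domain:/a"
def pvDiffWitnessOut_generate_domain_hierarchy_from_urn : (List String) × (List String) :=
  (["urn:li:domain:", "urn:li:domain:a"], ["urn:li:domain:", "urn:li:domain:/a"])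

-- ===== CLAIM (what is proved, stated in full; the proofs are below) =====
def Claim_unchanged_generate_domain_hierarchy_from_urn : Prop := ∀ (domain_urn : String), Dom_generate_domain_hierarchy_from_urn domain_urn → Spec_generate_domain_hierarchy_from_urn domain_urn (generate_domain_hierarchy_from_urn domain_urn)
def Claim_changed_generate_domain_hierarchy_from_urn : Prop := Dom_generate_domain_hierarchy_from_urn (pvDiffWitness_generate_domain_hierarchy_from_urn) ∧ D_generate_domain_hierarchy_from_urn (pvDiffWitness_generate_domain_hierarchy_from_urn) ∧ generate_domain_hierarchy_from_urn (pvDiffWitness_generate_domain_hierarchy_from_urn) = pvDiffWitnessOut_generate_domain_hierarchy_from_urn.1 ∧ generate_domain_hierarchy_from_urn_alt (pvDiffWitness_generate_domain_hierarchy_from_urn) = pvDiffWitnessOut_generate_domain_hierarchy_from_urn.2 ∧ pvDiffWitnessOut_generate_domain_hierarchy_from_urn.1 ≠ pvDiffWitnessOut_generate_domain_hierarchy_from_urn.2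
def Claim_exact_generate_domain_hierarchy_from_urn : Prop := ∀ (domain_urn : String), Dom_generate_domain_hierarchy_from_urn domain_urn → D_generate_domain_hierarchy_from_urn domain_urn → generate_domain_hierarchy_from_urn domain_urn ≠ generate_domain_hierarchy_from_urn_alt domain_urn

-- ===== LEMMAS AND PROOFS =====

-- simple structural model of path.split("/"): pre is the (already read) start of the current piece
def pvSplitAcc (pre : List Char) : List Char → List (List Char)
  | [] => [pre]
  | c :: rest => if c = '/' then pre :: pvSplitAcc [] rest else pvSplitAcc (pre ++ [c]) rest

-- the tail of A's hierarchy once current_path = cur is nonempty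
def pvChain (cur : List Char) : List (List Char) → List (List Char)
  | [] => []
  | s :: t => (pvPrefix ++ (cur ++ '/' :: s)) :: pvChain (cur ++ '/' :: s) t

theorem pvGo_spec (fuel : Nat) : ∀ (l cur : List Char) (accs : List (List Char)),
    l.length ≤ fuel →
    PySem.Chars.splitOn.go ['/'] fuel l cur accs = accs.reverse ++ pvSplitAcc cur.reverse l := by
  induction fuel with
  | zero =>
    intro l cur accs h
    have : l = [] := by simpa using h
    subst this
    simp [PySem.Chars.splitOn.go, pvSplitAcc]
  | succ n ih =>
    intro l cur accs h
    cases l with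
    | nil => simp [PySem.Chars.splitOn.go, pvSplitAcc]
    | cons c rest =>
      simp only [PySem.Chars.splitOn.go]
      by_cases hc : c = '/'
      · subst hc
        rw [if_pos (by simp [List.isPrefixOf])]
        rw [ih _ _ _ (by simpa using Nat.le_of_succ_le_succ h)]
        simp [pvSplitAcc]
      · rw [if_neg (by simp [List.isPrefixOf]; exact fun h' => hc h'.symm)]
        rw [ih _ _ _ (by simpa using Nat.le_of_succ_le_succ h)]
        simp [pvSplitAcc, hc]

theorem pvSplitOn_eq (path : List Char) :
    PySem.Chars.splitOn path ['/'] = pvSplitAcc [] path := by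
  unfold PySem.Chars.splitOn
  rw [pvGo_spec _ _ _ _ (by omega)]
  simp

theorem pvSplitAcc_head (l : List Char) : ∀ pre : List Char,
    ∃ rest, pvSplitAcc pre l = (pre ++ l.takeWhile (· ≠ '/')) :: rest := by
  induction l with
  | nil => intro pre; exact ⟨[], by simp [pvSplitAcc]⟩
  | cons c t ih =>
    intro pre
    by_cases hc : c = '/'
    · subst hc; exact ⟨pvSplitAcc [] t, by simp [pvSplitAcc]⟩
    · obtain ⟨rest, hr⟩ := ih (pre ++ [c])
      exact ⟨rest, by simp [pvSplitAcc, hc, hr]⟩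

theorem pvFoldA (t : List (List Char)) : ∀ (acc : List (List Char)) (cur : List Char),
    cur ≠ [] → (t.foldl pvStepA (acc, cur)).1 = acc ++ pvChain cur t := by
  induction t with
  | nil => intro acc cur h; simp [pvChain]
  | cons s t ih =>
    intro acc cur h
    simp only [List.foldl_cons, pvChain]
    rw [show pvStepA (acc, cur) s = (acc ++ [pvPrefix ++ (cur ++ '/' :: s)], cur ++ '/' :: s) by
      simp [pvStepA, h]]
    rw [ih _ _ (by simp)]
    simp

theorem pvChain_eq_map (t : List (List Char)) : ∀ cur : List Char,
    (List.range t.length).map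
      (fun n => pvPrefix ++ (cur ++ '/' :: PySem.Chars.join ['/'] (t.take (n + 1))))
      = pvChain cur t := by
  induction t with
  | nil => intro cur; simp [pvChain]
  | cons s t ih =>
    intro cur
    simp only [List.length_cons, List.range_succ_eq_map, List.map_cons, List.map_map, pvChain]
    rw [List.cons.injEq]
    refine ⟨by simp [PySem.Chars.join_singleton], ?_⟩
    rw [← ih (cur ++ '/' :: s)]
    apply List.map_congr_left
    intro n hn
    have ht : t ≠ [] := by rintro rfl; simp at hn
    have hne : t.take (n + 1) ≠ [] := by simp [List.take_eq_nil_iff, ht]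
    cases hq : t.take (n + 1) with
    | nil => exact absurd hq hne
    | cons q rest =>
      simp only [Function.comp, Nat.succ_eq_add_one, List.take_succ_cons, hq,
        PySem.Chars.join_cons_cons]
      simp

theorem pvMap_join (s0 : List Char) (t : List (List Char)) :
    (List.range (t.length + 1)).map
      (fun n => pvPrefix ++ PySem.Chars.join ['/'] ((s0 :: t).take (n + 1)))
      = (pvPrefix ++ s0) :: pvChain s0 t := by
  simp only [List.range_succ_eq_map, List.map_cons, List.map_map]
  rw [List.cons.injEq]
  refine ⟨by simp [PySem.Chars.join_singleton], ?_⟩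
  rw [← pvChain_eq_map t s0]
  apply List.map_congr_left
  intro n hn
  have ht : t ≠ [] := by rintro rfl; simp at hn
  have hne : t.take (n + 1) ≠ [] := by simp [List.take_eq_nil_iff, ht]
  cases hq : t.take (n + 1) with
  | nil => exact absurd hq hne
  | cons q rest =>
    simp only [Function.comp, Nat.succ_eq_add_one, List.take_succ_cons, hq,
      PySem.Chars.join_cons_cons]
    simp

-- common-value lemma: for segments with a nonempty head, both char-level lists agree
theorem pvBoth (s0 : List Char) (t : List (List Char)) (h0 : s0 ≠ []) :
    (((s0 :: t).foldl pvStepA ([], [])).1)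
      = (PySem.List.pyRange 0 (((s0 :: t).length : Nat) : Int) 1).map
          (fun i => pvPrefix ++ PySem.Chars.join ['/'] (PySem.List.slice (s0 :: t) none (some (i + 1)))) := by
  have hA : (((s0 :: t).foldl pvStepA ([], [])).1) = [pvPrefix ++ s0] ++ pvChain s0 t := by
    rw [List.foldl_cons, show pvStepA ([], []) s0 = ([pvPrefix ++ s0], s0) by simp [pvStepA]]
    exact pvFoldA t [pvPrefix ++ s0] s0 h0
  have hB : (PySem.List.pyRange 0 (((s0 :: t).length : Nat) : Int) 1).map
          (fun i => pvPrefix ++ PySem.Chars.join ['/'] (PySem.List.slice (s0 :: t) none (some (i + 1))))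
      = (List.range (t.length + 1)).map
          (fun n => pvPrefix ++ PySem.Chars.join ['/'] ((s0 :: t).take (n + 1))) := by
    rw [PySem.List.pyRange_one, List.map_map]
    have hlen : ((((s0 :: t).length : Nat) : Int) - 0).toNat = t.length + 1 := by simp
    rw [hlen]
    apply List.map_congr_left
    intro n hn
    have hsl : PySem.List.slice (s0 :: t) none (some ((n : Int) + 1)) = (s0 :: t).take (n + 1) := by
      rw [PySem.List.slice_to _ (by omega)]
      norm_num
    simp [hsl]
  rw [hA, hB, pvMap_join]
  simp

theorem pvB_norm' (segs : List (List Char)) :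
    (PySem.List.pyRange 0 ((segs.length : Nat) : Int) 1).map
        (fun i => String.ofList (pvPrefix ++ PySem.Chars.join ['/'] (PySem.List.slice segs none (some (i + 1)))))
      = (List.range segs.length).map
        (fun n => String.ofList (pvPrefix ++ PySem.Chars.join ['/'] (segs.take (n + 1)))) := by
  rw [PySem.List.pyRange_one, List.map_map]
  have hlen : (((segs.length : Nat) : Int) - 0).toNat = segs.length := by simp
  rw [hlen]
  apply List.map_congr_left
  intro n hn
  have hsl : PySem.List.slice segs none (some ((n : Int) + 1)) = segs.take (n + 1) := by
    rw [PySem.List.slice_to _ (by omega)]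
    norm_num
  simp [hsl]

-- D_ (stated on the String level) read on the List Char level used by the proofs
theorem pvD_iff (u : String) :
    D_generate_domain_hierarchy_from_urn u ↔
      (PySem.Chars.replace u.toList pvPrefix [] ≠ [] ∧
       PySem.Chars.startswith (PySem.Chars.replace u.toList pvPrefix []) ['/'] = true) := by
  unfold D_generate_domain_hierarchy_from_urn
  have h1 : (PySem.Str.replace u "urn:li:domain:" "" ≠ "") ↔
      PySem.Chars.replace u.toList pvPrefix [] ≠ [] := by
    rw [not_iff_not, ← String.toList_inj]
    simp [pvPrefix]
  have h2 : PySem.Str.startswith (PySem.Str.replace u "urn:li:domain:" "") "/" = true ↔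
      PySem.Chars.startswith (PySem.Chars.replace u.toList pvPrefix []) ['/'] = true := by
    simp [pvPrefix]
  rw [h1, h2]

theorem pvFold_prefix (t : List (List Char)) : ∀ (acc : List (List Char)) (cur : List Char),
    ∃ tail, (t.foldl pvStepA (acc, cur)).1 = acc ++ tail := by
  induction t with
  | nil => intro acc cur; exact ⟨[], by simp⟩
  | cons s t ih =>
    intro acc cur
    by_cases h : cur = []
    · obtain ⟨tail, ht⟩ := ih (acc ++ [pvPrefix ++ s]) s
      exact ⟨[pvPrefix ++ s] ++ tail, by simp [pvStepA, h, ht]⟩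
    · obtain ⟨tail, ht⟩ := ih (acc ++ [pvPrefix ++ (cur ++ '/' :: s)]) (cur ++ '/' :: s)
      exact ⟨[pvPrefix ++ (cur ++ '/' :: s)] ++ tail, by simp [pvStepA, h, ht]⟩


-- ===== VERDICT (by name: the statement is the Claim_ definition above) =====
theorem generate_domain_hierarchy_from_urn_spec : Claim_unchanged_generate_domain_hierarchy_from_urn := by
  intro u _hDom
  unfold Spec_generate_domain_hierarchy_from_urn
  intro hnD
  show generate_domain_hierarchy_from_urn u = generate_domain_hierarchy_from_urn_alt u
  simp only [generate_domain_hierarchy_from_urn, generate_domain_hierarchy_from_urn_alt]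
  by_cases hp : PySem.Chars.replace u.toList pvPrefix [] = []
  · simp [hp]
  · simp only [if_neg hp]
    have hsw : ¬ (['/'] <+: PySem.Chars.replace u.toList pvPrefix []) := by
      intro hpre
      exact hnD ((pvD_iff u).mpr ⟨hp, (PySem.Chars.startswith_iff _ _).mpr hpre⟩)
    rw [pvSplitOn_eq]
    cases hc : PySem.Chars.replace u.toList pvPrefix [] with
    | nil => exact absurd hc hp
    | cons c r =>
      have hcne : c ≠ '/' := by
        rintro rfl
        exact hsw (by rw [hc]; exact ⟨r, rfl⟩)
      obtain ⟨rest, hsegs⟩ := pvSplitAcc_head (c :: r) []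
      rw [List.takeWhile_cons_of_pos (by simpa using hcne)] at hsegs
      rw [hsegs]
      simp only [List.nil_append]
      rw [pvBoth (c :: List.takeWhile (fun x => decide (x ≠ '/')) r) rest (by simp),
        List.map_map]
      rfl

theorem generate_domain_hierarchy_from_urn_changed : Claim_changed_generate_domain_hierarchy_from_urn := by
  unfold Claim_changed_generate_domain_hierarchy_from_urn; decide

theorem generate_domain_hierarchy_from_urn_tight : Claim_exact_generate_domain_hierarchy_from_urn := by
  intro u _hDom hD
  obtain ⟨hp, hsw⟩ := (pvD_iff u).mp hD
  obtain ⟨r, hc⟩ : ∃ r, PySem.Chars.replace u.toList pvPrefix [] = '/' :: r := by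
    obtain ⟨t, ht⟩ := (PySem.Chars.startswith_iff _ _).mp hsw
    exact ⟨t, ht.symm⟩
  obtain ⟨rest, hsegs⟩ := pvSplitAcc_head r []
  have hsplit : pvSplitAcc [] ('/' :: r) = [] :: (r.takeWhile (· ≠ '/')) :: rest := by
    simp [pvSplitAcc, hsegs]
  simp only [generate_domain_hierarchy_from_urn, generate_domain_hierarchy_from_urn_alt,
    pvSplitOn_eq, hc, hsplit]
  rw [if_neg (List.cons_ne_nil _ _), if_neg (List.cons_ne_nil _ _)]
  set s1 := r.takeWhile (· ≠ '/') with hs1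
  -- A side: first two char-level entries
  obtain ⟨tailA, htA⟩ := pvFold_prefix rest ([pvPrefix ++ [], pvPrefix ++ s1]) s1
  have hA : (([] :: s1 :: rest).foldl pvStepA ([], [])).1
      = [pvPrefix ++ [], pvPrefix ++ s1] ++ tailA := by
    rw [List.foldl_cons, show pvStepA ([], []) [] = ([pvPrefix ++ []], []) by simp [pvStepA]]
    rw [List.foldl_cons, show pvStepA ([pvPrefix ++ []], []) s1
        = ([pvPrefix ++ [], pvPrefix ++ s1], s1) by simp [pvStepA]]
    exact htA
  -- B side: normalize and take first two entries
  rw [hA, pvB_norm']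
  have hlen : ([] :: s1 :: rest).length = rest.length + 1 + 1 := by simp
  rw [hlen, List.range_succ_eq_map, List.range_succ_eq_map]
  intro heq
  simp only [List.map_cons, List.map_map, List.cons_append, List.nil_append,
    List.cons.injEq] at heq
  have h1 := heq.2.1
  -- heq.2.1 : ofList (pvPrefix ++ s1) = ofList (pvPrefix ++ join (take 2 ([] :: s1 :: rest)))
  have := congrArg String.toList h1
  simp only [String.toList_ofList] at this
  have h2 : pvPrefix ++ s1 = pvPrefix ++ ('/' :: s1) := by
    simp only [Nat.succ_eq_add_one, Nat.reduceAdd, List.take_succ_cons, List.take_zero,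
      PySem.Chars.join_cons_cons, PySem.Chars.join_singleton, List.nil_append,
      List.singleton_append] at this
    exact this
  have := List.append_cancel_left h2
  exact absurd (congrArg List.length this) (by simp)
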